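-- pv_equiv track=rewrite | github.com/hellorahat/UNavMaze | CrossCompute/Phase2/Iteration2/run.py | getMinAndMax
-- ===== SOURCE A (Python) =====
-- def getMinAndMax(data):
--     """
--     Gets the minimum and maximum weight values from a maze.
--     :param data: The 2D list to get the information from.
--     """
--     min = 999999999
--     max = 0
--     for i in range(len(data)):
--         for v in range(len(data[0])):
--             entry = data[i][v]
--             if entry.isnumeric():
--                 if int(entry) > 1:
--                     if int(entry) < min:
--                         min = int(entry)
--                     if int(entry) > max:
--                         max = int(entry)
--     if min > max: # If we still have the sentinal value of 999999999 for min, we return 0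
--         min = 0
--     return min,max
-- ===== SOURCE B (Python) =====
-- def getMinAndMax(data):
--     """
--     Gets the minimum and maximum weight values from a maze.
--     :param data: The 2D list to get the information from.
--     """
--     width = len(data[0]) if data else 0
--     weights = sorted({int(c) for row in data for c in row[:width]
--                       if c.isnumeric() and int(c) > 1})
--     if not weights:
--         return 0, 0
--     return weights[0], weights[-1]
-- ===== Notes on version B (the rewrite author's own statement) =====
-- stated objective: alternative
-- what changed: Replaces A's fused index-driven running-min/max loop with its 999999999 sentinel by a set-then-sort algorithm: collect the distinct weights into a set, sort them once, and read the minimum and maximum off the two endpoints of the sorted list ((0,0) when the set is empty).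
-- intended difference: On grids that contain at least one weight cell (numeric string with value > 1) but whose every such cell exceeds 999999999, A returns its leftover sentinel 999999999 as the minimum while B returns the true minimum weight, which is the intended value. — e.g. on getMinAndMax([["1000000000"]]): A returns (999999999, 1000000000), B returns (1000000000, 1000000000)
import Mathlib
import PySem

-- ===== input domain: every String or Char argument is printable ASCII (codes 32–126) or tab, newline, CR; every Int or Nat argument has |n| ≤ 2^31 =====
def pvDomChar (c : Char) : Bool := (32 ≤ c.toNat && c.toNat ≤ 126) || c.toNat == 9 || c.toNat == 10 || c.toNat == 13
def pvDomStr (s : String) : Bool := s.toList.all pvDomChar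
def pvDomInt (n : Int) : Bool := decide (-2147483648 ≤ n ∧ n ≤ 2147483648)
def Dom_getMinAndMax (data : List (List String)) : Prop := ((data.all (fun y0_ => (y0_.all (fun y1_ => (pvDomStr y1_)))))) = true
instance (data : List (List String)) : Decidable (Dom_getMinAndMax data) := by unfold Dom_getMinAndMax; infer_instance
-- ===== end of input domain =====

-- B replaces A's fused index-driven running-min/max loop (sentinel 999999999) by a set-then-sort
-- algorithm: collect the distinct weights into a set, sort once, read min/max off the endpoints;
-- objective: alternative.

-- ===== PORT A =====
-- Literal port of A's nested index loops.  entry.isnumeric() is ported as strIsdigit (exact on the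
-- ASCII domain); int(entry) as (ofStr? entry).getD 0 — under the isnumeric guard the parse succeeds,
-- so the default is unreachable; pyGetD defaults are unreachable under Pre_ (no row shorter than row 0).
def getMinAndMax (data : List (List String)) : Int × Int :=
  let p : Int × Int :=
    (PySem.List.pyRange 0 (data.length : Int) 1).foldl (fun (st : Int × Int) i =>
      (PySem.List.pyRange 0 (((PySem.List.pyGetD data 0 []).length : Int)) 1).foldl
        (fun (st : Int × Int) v =>
          let entry := PySem.List.pyGetD (PySem.List.pyGetD data i []) v ""
          if PySem.Str.strIsdigit entry then
            if (PySem.Int.ofStr? entry).getD 0 > 1 then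
              let st1 := if (PySem.Int.ofStr? entry).getD 0 < st.1
                         then ((PySem.Int.ofStr? entry).getD 0, st.2) else st
              if (PySem.Int.ofStr? entry).getD 0 > st1.2
              then (st1.1, (PySem.Int.ofStr? entry).getD 0) else st1
            else st
          else st) st) (999999999, 0)
  if p.1 > p.2 then (0, p.2) else p

-- ===== PORT B =====
-- Literal port of Source B: width = len(data[0]) if data else 0; the set comprehension over row[:width]
-- is PySem.Set.ofList of the flatMap/slice/filterMap stream; sorted(...) is PySem.List.sorted;
-- weights[0] / weights[-1] are pyGet? 0 / pyGet? (-1), with a default unreachable under the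
-- nonemptiness guard.
def getMinAndMax_alt (data : List (List String)) : Int × Int :=
  let w : Int := if data.isEmpty then 0 else ((data.headD []).length : Int)
  let weights : List Int :=
    PySem.List.sorted
      (PySem.Set.ofList
        ((data.flatMap (fun row => PySem.List.slice row none (some w))).filterMap (fun c =>
          if PySem.Str.strIsdigit c && decide (1 < (PySem.Int.ofStr? c).getD 0)
          then some ((PySem.Int.ofStr? c).getD 0) else none)))
      (fun x => x) false
  if weights.isEmpty then (0, 0)
  else ((PySem.List.pyGet? weights 0).getD 0, (PySem.List.pyGet? weights (-1)).getD 0)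

-- ===== PRECONDITION & SPEC =====
-- Pre_ is exactly the inputs on which A returns: a row shorter than the first row makes A's
-- data[i][v] raise IndexError (v runs up to len(data[0]) - 1).
def Pre_getMinAndMax (data : List (List String)) : Prop :=
  ∀ row ∈ data, (data.headD []).length ≤ row.length
instance (data : List (List String)) : Decidable (Pre_getMinAndMax data) := by
  unfold Pre_getMinAndMax; infer_instance

def pvWitness_getMinAndMax : List (List String) := [["5", "#"], ["a", "9", "7"]]

-- Input inspection used only by D_: the maze cells both programs look at (the first len(data[0])
-- columns), and the weight test through the two primitives both ports share (digit test, int parser).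
def pvCells (data : List (List String)) : List String :=
  data.flatMap (·.take (data.headD []).length)
def pvWeightAbove (c : String) (b : Int) : Bool :=
  PySem.Str.strIsdigit c && (PySem.Int.ofStr? c).any fun n => decide (b < n)

-- On grids with at least one weight cell (numeric, > 1) whose every weight cell exceeds 999999999,
-- A returns its leftover sentinel 999999999 as the minimum; B returns the true minimum weight, the
-- intended value.
def D_getMinAndMax (data : List (List String)) : Prop :=
  (∃ c ∈ pvCells data, pvWeightAbove c 999999999 = true) ∧
  ∀ c ∈ pvCells data, pvWeightAbove c 1 = true → pvWeightAbove c 999999999 = true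
instance (data : List (List String)) : Decidable (D_getMinAndMax data) := by
  unfold D_getMinAndMax; infer_instance

def Spec_getMinAndMax (data : List (List String)) (out : Int × Int) : Prop :=
  ¬ D_getMinAndMax data → out = getMinAndMax_alt data
instance (data : List (List String)) (out : Int × Int) : Decidable (Spec_getMinAndMax data out) := by
  unfold Spec_getMinAndMax; infer_instance

def pvDiffWitness_getMinAndMax : List (List String) := [["1000000000"]]
def pvDiffWitnessOut_getMinAndMax : (Int × Int) × (Int × Int) :=
  ((999999999, 1000000000), (1000000000, 1000000000))

-- ===== CLAIM (what is proved, stated in full; the proofs are below) =====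
def Claim_unchanged_getMinAndMax : Prop := ∀ (data : List (List String)), Dom_getMinAndMax data → Pre_getMinAndMax data → Spec_getMinAndMax data (getMinAndMax data)
def Claim_changed_getMinAndMax : Prop := Dom_getMinAndMax (pvDiffWitness_getMinAndMax) ∧ Pre_getMinAndMax (pvDiffWitness_getMinAndMax) ∧ D_getMinAndMax (pvDiffWitness_getMinAndMax) ∧ getMinAndMax (pvDiffWitness_getMinAndMax) = pvDiffWitnessOut_getMinAndMax.1 ∧ getMinAndMax_alt (pvDiffWitness_getMinAndMax) = pvDiffWitnessOut_getMinAndMax.2 ∧ pvDiffWitnessOut_getMinAndMax.1 ≠ pvDiffWitnessOut_getMinAndMax.2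
def Claim_exact_getMinAndMax : Prop := ∀ (data : List (List String)), Dom_getMinAndMax data → Pre_getMinAndMax data → D_getMinAndMax data → getMinAndMax data ≠ getMinAndMax_alt data

-- ===== LEMMAS AND PROOFS =====

def pvIsWeight (c : String) : Bool :=
  PySem.Str.strIsdigit c && decide (1 < (PySem.Int.ofStr? c).getD 0)

def pvWeight? (c : String) : Option Int :=
  if pvIsWeight c then some ((PySem.Int.ofStr? c).getD 0) else none

def pvStep (st : Int × Int) (entry : String) : Int × Int :=
  match pvWeight? entry with
  | none => st
  | some n => (if n < st.1 then n else st.1, if st.2 < n then n else st.2)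

def pvBody (st : Int × Int) (entry : String) : Int × Int :=
  if PySem.Str.strIsdigit entry then
    if (PySem.Int.ofStr? entry).getD 0 > 1 then
      let st1 := if (PySem.Int.ofStr? entry).getD 0 < st.1
                 then ((PySem.Int.ofStr? entry).getD 0, st.2) else st
      if (PySem.Int.ofStr? entry).getD 0 > st1.2
      then (st1.1, (PySem.Int.ofStr? entry).getD 0) else st1
    else st
  else st

def pvRowFold (cols : Nat) (st : Int × Int) (row : List String) : Int × Int :=
  (PySem.List.pyRange 0 (cols : Int) 1).foldl
    (fun st v => pvBody st (PySem.List.pyGetD row v "")) st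

def pvVals (data : List (List String)) : List Int :=
  (pvCells data).filterMap pvWeight?

lemma pvBody_eq (st : Int × Int) (e : String) : pvBody st e = pvStep st e := by
  obtain ⟨mn, mx⟩ := st
  unfold pvBody pvStep pvWeight? pvIsWeight
  by_cases h1 : PySem.Chars.strIsdigit e.toList = true <;>
    by_cases h2 : (1 : Int) < (PySem.Int.ofStr? e).getD 0 <;>
      simp [h1, h2] <;> split_ifs <;> simp_all

lemma pvA_unfold (data : List (List String)) :
    getMinAndMax data =
      (if (data.foldl (pvRowFold (PySem.List.pyGetD data 0 []).length) (999999999, 0)).1 >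
          (data.foldl (pvRowFold (PySem.List.pyGetD data 0 []).length) (999999999, 0)).2
       then ((0 : Int),
         (data.foldl (pvRowFold (PySem.List.pyGetD data 0 []).length) (999999999, 0)).2)
       else data.foldl (pvRowFold (PySem.List.pyGetD data 0 []).length) (999999999, 0)) := by
  unfold getMinAndMax
  exact congrArg (fun q : Int × Int => if q.1 > q.2 then ((0 : Int), q.2) else q)
    (PySem.List.foldl_pyRange_zero_pyGetD' data ([] : List String)
      (pvRowFold (PySem.List.pyGetD data 0 []).length) ((999999999 : Int), (0 : Int)))

lemma pvRowFold_eq (cols : Nat) (row : List String) (h : cols ≤ row.length) (st : Int × Int) :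
    pvRowFold cols st row = (row.take cols).foldl pvStep st := by
  unfold pvRowFold
  have hlen : (row.take cols).length = cols := by simp [h]
  have hcong : (PySem.List.pyRange 0 (cols : Int) 1).foldl
        (fun st v => pvBody st (PySem.List.pyGetD row v "")) st
      = (PySem.List.pyRange 0 (cols : Int) 1).foldl
        (fun st v => pvBody st (PySem.List.pyGetD (row.take cols) v "")) st := by
    apply PySem.List.foldl_congr_mem
    intro acc x hx
    rcases PySem.List.mem_pyRange_one.mp hx with ⟨h0, h1⟩
    rw [PySem.List.pyGetD_eq_getElem row "" h0 (by push_cast; omega),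
        PySem.List.pyGetD_eq_getElem (row.take cols) "" h0 (by rw [hlen]; exact h1),
        List.getElem_take]
  rw [hcong]
  have h2 := PySem.List.foldl_pyRange_zero_pyGetD' (row.take cols) "" pvBody st
  rw [hlen] at h2
  rw [h2]
  exact PySem.List.foldl_congr_mem (row.take cols) pvBody pvStep st
    (fun acc x _ => pvBody_eq acc x)

lemma pvFoldl_pvStep (cells : List String) (mn mx : Int) :
    cells.foldl pvStep (mn, mx) =
      ((cells.filterMap pvWeight?).foldl (fun a n => if n < a then n else a) mn,
       (cells.filterMap pvWeight?).foldl (fun a n => if a < n then n else a) mx) := by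
  induction cells generalizing mn mx with
  | nil => simp
  | cons c t ih =>
    cases h : pvWeight? c with
    | none => simp only [List.foldl_cons, List.filterMap_cons, h, pvStep]; exact ih mn mx
    | some n =>
      simp only [List.foldl_cons, List.filterMap_cons, h, pvStep]
      exact ih _ _

lemma pvFoldl_minstep (l : List Int) (a : Int) :
    l.foldl (fun a n => if n < a then n else a) a = l.foldl min a := by
  induction l generalizing a with
  | nil => rfl
  | cons x t ih =>
    simp only [List.foldl_cons]
    have hx : (if x < a then x else a) = min a x := by
      rw [min_def]; split_ifs <;> omega
    rw [hx]; exact ih _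

lemma pvFoldl_maxstep (l : List Int) (a : Int) :
    l.foldl (fun a n => if a < n then n else a) a = l.foldl max a := by
  induction l generalizing a with
  | nil => rfl
  | cons x t ih =>
    simp only [List.foldl_cons]
    have hx : (if a < x then x else a) = max a x := by
      rw [max_def]; split_ifs <;> omega
    rw [hx]; exact ih _

lemma pvFoldl_min_init (t : List Int) (a b : Int) :
    t.foldl min (min a b) = min a (t.foldl min b) := by
  induction t generalizing b with
  | nil => rfl
  | cons x t ih =>
    simp only [List.foldl_cons]
    rw [min_assoc]; exact ih _

lemma pvFoldl_max_init (t : List Int) (a b : Int) :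
    t.foldl max (max a b) = max a (t.foldl max b) := by
  induction t generalizing b with
  | nil => rfl
  | cons x t ih =>
    simp only [List.foldl_cons]
    rw [max_assoc]; exact ih _

lemma pvMem_vals_gt (data : List (List String)) (n : Int) (h : n ∈ pvVals data) : 1 < n := by
  rcases List.mem_filterMap.mp h with ⟨c, _, hw⟩
  unfold pvWeight? at hw
  by_cases hb : pvIsWeight c = true
  · rw [if_pos hb] at hw
    injection hw with hn
    unfold pvIsWeight at hb
    rw [Bool.and_eq_true, decide_eq_true_iff] at hb
    omega
  · rw [if_neg hb] at hw; exact absurd hw (by simp)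

lemma pvAbove_one_iff (c : String) :
    pvWeightAbove c 1 = true ↔ ∃ n, pvWeight? c = some n := by
  unfold pvWeightAbove pvWeight? pvIsWeight
  cases ho : PySem.Int.ofStr? c with
  | none => simp [Option.any]
  | some m =>
    by_cases hd : PySem.Chars.strIsdigit c.toList = true <;>
      simp [hd, Option.any]

lemma pvAbove_sent_iff (c : String) :
    pvWeightAbove c 999999999 = true ↔ ∃ n, pvWeight? c = some n ∧ 999999999 < n := by
  unfold pvWeightAbove pvWeight? pvIsWeight
  cases ho : PySem.Int.ofStr? c with
  | none => simp [Option.any]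
  | some m =>
    by_cases hd : PySem.Chars.strIsdigit c.toList = true <;>
      simp [hd, Option.any]
    omega

-- A's result, under Pre_, in collect-then-reduce form (min still fused with the sentinel).
lemma pvMain_form (data : List (List String)) (hpre : Pre_getMinAndMax data) :
    getMinAndMax data =
      (match pvVals data with
       | [] => ((0 : Int), (0 : Int))
       | v :: t => (min 999999999 (t.foldl min v), t.foldl max v)) := by
  have hh : (PySem.List.pyGetD data 0 []) = data.headD [] := by
    cases data <;> simp [PySem.List.pyGetD_zero]
  rw [pvA_unfold, hh]
  have h1 : data.foldl (pvRowFold (data.headD []).length) ((999999999 : Int), (0 : Int))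
      = data.foldl (fun st row => (row.take (data.headD []).length).foldl pvStep st)
          ((999999999 : Int), (0 : Int)) :=
    PySem.List.foldl_congr_mem data _ _ _
      (fun acc row hrow => pvRowFold_eq _ row (hpre row hrow) acc)
  have h2 : data.foldl (fun st row => (row.take (data.headD []).length).foldl pvStep st)
        ((999999999 : Int), (0 : Int))
      = (pvCells data).foldl pvStep ((999999999 : Int), (0 : Int)) := by
    unfold pvCells
    rw [List.flatMap_def, List.foldl_flatten, List.foldl_map]
  have hpv : (pvCells data).filterMap pvWeight? = pvVals data := rfl
  rw [h1, h2, pvFoldl_pvStep, hpv, pvFoldl_minstep, pvFoldl_maxstep]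
  cases hv : pvVals data with
  | nil => norm_num
  | cons v t =>
    show (if ((v :: t).foldl min (999999999 : Int), (v :: t).foldl max (0 : Int)).1 >
             ((v :: t).foldl min (999999999 : Int), (v :: t).foldl max (0 : Int)).2
          then ((0 : Int), ((v :: t).foldl min (999999999 : Int), (v :: t).foldl max (0 : Int)).2)
          else ((v :: t).foldl min (999999999 : Int), (v :: t).foldl max (0 : Int)))
        = (min 999999999 (t.foldl min v), t.foldl max v)
    simp only [List.foldl_cons]
    rw [pvFoldl_min_init, pvFoldl_max_init]
    have hMmem : t.foldl max v ∈ pvVals data := by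
      rw [hv]; exact PySem.List.max?_mem (PySem.List.max?_id_cons v t)
    have hmmem : t.foldl min v ∈ pvVals data := by
      rw [hv]; exact PySem.List.min?_mem (PySem.List.min?_id_cons v t)
    have hMgt : (1 : Int) < t.foldl max v := pvMem_vals_gt data _ hMmem
    have hle : t.foldl min v ≤ t.foldl max v := by
      have hmm := hmmem
      rw [hv] at hmm
      exact PySem.List.max?_isMax (PySem.List.max?_id_cons v t) _ hmm
    rw [max_eq_right (by omega : (0 : Int) ≤ t.foldl max v)]
    have hnot : ¬ ((min (999999999 : Int) (t.foldl min v), t.foldl max v).1 >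
                   (min (999999999 : Int) (t.foldl min v), t.foldl max v).2) := by
      have hm : min (999999999 : Int) (t.foldl min v) ≤ t.foldl min v := min_le_right _ _
      simp only [gt_iff_lt, not_lt]
      omega
    rw [if_neg hnot]

-- Any member of a (≤)-sorted list is at most its last element.
lemma pvLast_ge (l : List Int) (hp : l.Pairwise (fun a b : Int => a ≤ b)) (hne : l ≠ []) :
    ∀ y ∈ l, y ≤ l.getLast hne := by
  induction l with
  | nil => intro y hy; exact absurd hy List.not_mem_nil
  | cons a tl ih =>
    intro y hy
    rcases List.pairwise_cons.mp hp with ⟨ha, hptl⟩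
    cases tl with
    | nil =>
      have hya : y = a := by simpa using hy
      simp [hya]
    | cons b tl2 =>
      rw [List.getLast_cons (List.cons_ne_nil b tl2)]
      rcases List.mem_cons.mp hy with h | h
      · subst h
        exact ha _ (List.getLast_mem (List.cons_ne_nil b tl2))
      · exact ih hptl (List.cons_ne_nil b tl2) y h

-- The endpoint read-off of sorted(set(vals)) equals min/max of vals.
lemma pvReduce (vals : List Int) :
    (let W := PySem.List.sorted (PySem.Set.ofList vals) (fun x => x) false
     if W.isEmpty then ((0 : Int), (0 : Int))
     else ((PySem.List.pyGet? W 0).getD 0, (PySem.List.pyGet? W (-1)).getD 0)) =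
      (match vals with
       | [] => ((0 : Int), (0 : Int))
       | v :: t => (t.foldl min v, t.foldl max v)) := by
  cases hv : vals with
  | nil => rfl
  | cons v t =>
    have hmemW : ∀ y, y ∈ PySem.List.sorted (PySem.Set.ofList (v :: t)) (fun x => x) false ↔ y ∈ v :: t := by
      intro y
      rw [PySem.List.mem_sorted, PySem.Set.mem_ofList]
    cases hW : PySem.List.sorted (PySem.Set.ofList (v :: t)) (fun x => x) false with
    | nil =>
      exfalso
      have := (hmemW v).mpr List.mem_cons_self
      rw [hW] at this
      exact absurd this (List.not_mem_nil)
    | cons m rest =>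
      simp only [List.isEmpty_cons]
      rw [PySem.List.pyGet?_zero_cons, PySem.List.pyGet?_neg_one]
      have hmin : m = t.foldl min v := by
        have hfm : t.foldl min v ∈ v :: t := PySem.List.min?_mem (PySem.List.min?_id_cons v t)
        have h1 : m ≤ t.foldl min v := by
          have := PySem.List.key_head_sorted_le (xs := PySem.Set.ofList (v :: t))
            (key := fun x => x) hW
          exact this _ ((PySem.Set.mem_ofList _ _).mpr hfm)
        have h2 : t.foldl min v ≤ m := by
          have hm : m ∈ v :: t := (hmemW m).mp (by rw [hW]; exact List.mem_cons_self)
          exact PySem.List.min?_isMin (PySem.List.min?_id_cons v t) _ hm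
        omega
      have hlast :
          ((m :: rest).getLast?).getD 0 = t.foldl max v := by
        have hne : (m :: rest) ≠ ([] : List Int) := List.cons_ne_nil _ _
        rw [List.getLast?_eq_some_getLast hne]
        simp only [Option.getD_some]
        have hp : (m :: rest).Pairwise (fun a b : Int => a ≤ b) := by
          have hpx := PySem.List.sorted_pairwise (xs := PySem.Set.ofList (v :: t))
            (key := fun x : Int => x)
          rw [hW] at hpx
          exact hpx
        have hfM : t.foldl max v ∈ v :: t := PySem.List.max?_mem (PySem.List.max?_id_cons v t)
        have h1 : (m :: rest).getLast hne ≤ t.foldl max v := by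
          have hm : (m :: rest).getLast hne ∈ v :: t :=
            (hmemW _).mp (by rw [hW]; exact List.getLast_mem hne)
          exact PySem.List.max?_isMax (PySem.List.max?_id_cons v t) _ hm
        have h2 : t.foldl max v ≤ (m :: rest).getLast hne := by
          have hmem : t.foldl max v ∈ m :: rest := by
            rw [← hW]; exact (hmemW _).mpr hfM
          exact pvLast_ge (m :: rest) hp hne _ hmem
        omega
      rw [hmin] at *
      exact congrArg (fun z => (t.foldl min v, z)) hlast

-- B's result in the same collect-then-reduce form (no sentinel): the head of the sorted distinct
-- set is min of the stream, the last element is max.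
lemma pvAlt_form (data : List (List String)) :
    getMinAndMax_alt data =
      (match pvVals data with
       | [] => ((0 : Int), (0 : Int))
       | v :: t => (t.foldl min v, t.foldl max v)) := by
  cases data with
  | nil => rfl
  | cons r rs =>
    have hsl : (fun row => PySem.List.slice row none (some ((r.length : Nat) : Int)))
        = (fun row : List String => row.take r.length) := by
      funext row
      rw [PySem.List.slice_to row (Int.natCast_nonneg _)]
      simp
    have hE : ((r :: rs).flatMap (fun row => PySem.List.slice row none (some ((r.length : Nat) : Int)))).filterMap
          (fun c => if PySem.Str.strIsdigit c && decide (1 < (PySem.Int.ofStr? c).getD 0)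
                    then some ((PySem.Int.ofStr? c).getD 0) else none)
        = pvVals (r :: rs) := by
      rw [hsl]; rfl
    show (let W := PySem.List.sorted (PySem.Set.ofList
            (((r :: rs).flatMap (fun row => PySem.List.slice row none (some ((r.length : Nat) : Int)))).filterMap
              (fun c => if PySem.Str.strIsdigit c && decide (1 < (PySem.Int.ofStr? c).getD 0)
                        then some ((PySem.Int.ofStr? c).getD 0) else none))) (fun x => x) false
          if W.isEmpty then ((0 : Int), (0 : Int))
          else ((PySem.List.pyGet? W 0).getD 0, (PySem.List.pyGet? W (-1)).getD 0)) = _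
    rw [hE, pvReduce]

-- ===== VERDICT (by name: the statement is the Claim_ definition above) =====
theorem getMinAndMax_spec : Claim_unchanged_getMinAndMax := by
  intro data _ hpre hnd
  rw [pvMain_form data hpre, pvAlt_form data]
  cases hv : pvVals data with
  | nil => rfl
  | cons v t =>
    have hex : ∃ n ∈ pvVals data, n ≤ 999999999 := by
      by_cases hsmall : ∀ c ∈ pvCells data, pvWeightAbove c 1 = true →
          pvWeightAbove c 999999999 = true
      · exfalso
        apply hnd
        refine ⟨?_, hsmall⟩
        have hvmem : v ∈ pvVals data := by rw [hv]; exact List.mem_cons_self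
        rcases List.mem_filterMap.mp hvmem with ⟨c, hcf, hw⟩
        exact ⟨c, hcf, hsmall c hcf ((pvAbove_one_iff c).mpr ⟨v, hw⟩)⟩
      · push_neg at hsmall
        rcases hsmall with ⟨c, hcf, h1, hns⟩
        rcases (pvAbove_one_iff c).mp h1 with ⟨n, hw⟩
        refine ⟨n, List.mem_filterMap.mpr ⟨c, hcf, hw⟩, ?_⟩
        by_contra hgt
        exact hns ((pvAbove_sent_iff c).mpr ⟨n, hw, by omega⟩)
    rcases hex with ⟨n, hmem, hle⟩
    rw [hv] at hmem
    have hmin := PySem.List.min?_isMin (PySem.List.min?_id_cons v t) _ hmem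
    show (min 999999999 (t.foldl min v), t.foldl max v) = (t.foldl min v, t.foldl max v)
    rw [min_eq_right (by omega : t.foldl min v ≤ (999999999 : Int))]

theorem getMinAndMax_changed : Claim_changed_getMinAndMax := by
  unfold Claim_changed_getMinAndMax; decide

theorem getMinAndMax_tight : Claim_exact_getMinAndMax := by
  intro data _ hpre hD hEq
  rw [pvMain_form data hpre, pvAlt_form data] at hEq
  obtain ⟨hC1, hC2⟩ := hD
  have hne : pvVals data ≠ [] := by
    rcases hC1 with ⟨c, hcf, hb⟩
    rcases (pvAbove_sent_iff c).mp hb with ⟨n, hw, _⟩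
    exact List.ne_nil_of_mem (List.mem_filterMap.mpr ⟨c, hcf, hw⟩)
  cases hv : pvVals data with
  | nil => exact hne hv
  | cons v t =>
    rw [hv] at hEq
    have hEq' : (min (999999999 : Int) (t.foldl min v), t.foldl max v)
        = (t.foldl min v, t.foldl max v) := hEq
    have hmmem : t.foldl min v ∈ pvVals data := by
      rw [hv]; exact PySem.List.min?_mem (PySem.List.min?_id_cons v t)
    rcases List.mem_filterMap.mp hmmem with ⟨c, hcf, hw⟩
    have hbig : (999999999 : Int) < t.foldl min v := by
      have hs := hC2 c hcf ((pvAbove_one_iff c).mpr ⟨_, hw⟩)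
      rcases (pvAbove_sent_iff c).mp hs with ⟨n, hw', hgt⟩
      rw [hw] at hw'
      injection hw' with h
      omega
    have h1 : min (999999999 : Int) (t.foldl min v) = t.foldl min v :=
      congrArg Prod.fst hEq'
    rw [min_eq_left (by omega : (999999999 : Int) ≤ t.foldl min v)] at h1
    omega
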